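-- pv_equiv track=rewrite | github.com/mauriciocucco/gaia | src/hf_gaia_agent/graph.py | _is_obviously_bad_candidate_url
-- ===== SOURCE A (Python) =====
-- def _is_obviously_bad_candidate_url(url: str) -> bool:
--     lowered = url.lower()
--     bad_fragments = (
--         "forum.",
--         "forums.",
--         "reddit.com",
--         "redd.it",
--         "quora.com",
--         "zhihu.com",
--         "news.google",
--         "grokipedia",
--         "instagram.com",
--         "facebook.com",
--         "fandom.com",
--         "pinterest.com",
--         "tiktok.com",
--         "lowyat.net",
--         "naca.com",
--         "/search?",
--     )
--     return any(fragment in lowered for fragment in bad_fragments)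
-- ===== SOURCE B (Python) =====
-- BAD_FRAGMENTS = (
--     "forum.",
--     "forums.",
--     "reddit.com",
--     "redd.it",
--     "quora.com",
--     "zhihu.com",
--     "news.google",
--     "grokipedia",
--     "instagram.com",
--     "facebook.com",
--     "fandom.com",
--     "pinterest.com",
--     "tiktok.com",
--     "lowyat.net",
--     "naca.com",
--     "/search?",
-- )
--
--
-- def _is_obviously_bad_candidate_url(url: str) -> bool:
--     # Single left-to-right pass over the lowered URL: at each position, test
--     # whether any blacklisted fragment starts exactly there.
--     lowered = url.lower()
--     for i in range(len(lowered)):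
--         if any(lowered.startswith(f, i) for f in BAD_FRAGMENTS):
--             return True
--     return False
-- ===== Notes on version B (the rewrite author's own statement) =====
-- stated objective: alternative
-- what changed: A asks per fragment whether it occurs anywhere in the URL (16 independent substring scans); B makes one left-to-right pass over the lowered URL and at each position checks which fragment starts there, so the string is traversed once.
import Mathlib
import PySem

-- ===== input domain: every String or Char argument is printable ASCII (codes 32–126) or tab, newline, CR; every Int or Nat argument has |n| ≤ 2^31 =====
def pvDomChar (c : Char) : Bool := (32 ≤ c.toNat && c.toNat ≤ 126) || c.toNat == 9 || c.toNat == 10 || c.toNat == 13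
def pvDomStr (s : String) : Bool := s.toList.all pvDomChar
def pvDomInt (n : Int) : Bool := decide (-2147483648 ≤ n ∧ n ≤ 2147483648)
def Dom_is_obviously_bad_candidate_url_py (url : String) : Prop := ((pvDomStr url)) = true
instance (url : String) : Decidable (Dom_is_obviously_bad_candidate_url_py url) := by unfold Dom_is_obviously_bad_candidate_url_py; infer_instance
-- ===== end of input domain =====

-- B makes one left-to-right pass over the lowered URL, testing at each position which
-- fragment starts there, instead of A's 16 independent whole-string substring scans.

-- ===== PORT A =====
def badFragments : List String :=
  ["forum.", "forums.", "reddit.com", "redd.it", "quora.com", "zhihu.com",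
   "news.google", "grokipedia", "instagram.com", "facebook.com", "fandom.com",
   "pinterest.com", "tiktok.com", "lowyat.net", "naca.com", "/search?"]

def is_obviously_bad_candidate_url_py (url : String) : Bool :=
  let lowered := PySem.Str.lower url
  badFragments.any (fun fragment => PySem.Str.isIn fragment lowered)

-- ===== PORT B =====
-- the loop 'for i in range(len(lowered)): if any(lowered.startswith(f, i) …)',
-- written as structural recursion over the suffix starting at position i
def scanBad (frags : List (List Char)) : List Char → Bool
  | [] => false
  | c :: rest =>
    (frags.any fun f => PySem.Chars.startswith (c :: rest) f) || scanBad frags rest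

def is_obviously_bad_candidate_url_py_alt (url : String) : Bool :=
  scanBad (badFragments.map String.toList) (PySem.Str.lower url).toList

-- ===== PRECONDITION & SPEC =====
def Spec_is_obviously_bad_candidate_url_py (url : String) (out : Bool) : Prop := out = is_obviously_bad_candidate_url_py_alt url
instance (url : String) (out : Bool) : Decidable (Spec_is_obviously_bad_candidate_url_py url out) := by unfold Spec_is_obviously_bad_candidate_url_py; infer_instance

-- ===== CLAIM (what is proved, stated in full; the proofs are below) =====
def Claim_equal_is_obviously_bad_candidate_url_py : Prop := ∀ (url : String), Dom_is_obviously_bad_candidate_url_py url → Spec_is_obviously_bad_candidate_url_py url (is_obviously_bad_candidate_url_py url)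

-- ===== LEMMAS AND PROOFS =====

lemma pvAnyOr {α : Type} (l : List α) (p q : α → Bool) :
    (l.any fun x => p x || q x) = (l.any p || l.any q) := by
  induction l with
  | nil => rfl
  | cons a l ih =>
    simp only [List.any_cons, ih]
    cases p a <;> cases q a <;> simp

lemma scanBad_eq_any_isIn (frags : List (List Char)) (h : ∀ f ∈ frags, f ≠ []) :
    ∀ cs : List Char, scanBad frags cs = frags.any (fun f => PySem.Chars.isIn f cs) := by
  intro cs
  induction cs with
  | nil =>
    simp only [scanBad]
    symm
    simp only [List.any_eq_false]
    intro f hf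
    simp only [PySem.Chars.isIn_iff_infix, List.infix_nil]
    exact h f hf
  | cons c rest ih =>
    simp only [scanBad, ih]
    rw [← pvAnyOr]
    refine List.any_congr rfl fun f => ?_
    apply Bool.eq_iff_iff.mpr
    simp only [Bool.or_eq_true, PySem.Chars.startswith_iff, PySem.Chars.isIn_iff_infix,
      List.infix_cons_iff]

-- ===== VERDICT (by name: the statement is the Claim_ definition above) =====
theorem is_obviously_bad_candidate_url_py_spec : Claim_equal_is_obviously_bad_candidate_url_py := by
  intro url _
  unfold Spec_is_obviously_bad_candidate_url_py
  unfold is_obviously_bad_candidate_url_py is_obviously_bad_candidate_url_py_alt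
  rw [scanBad_eq_any_isIn _ (by decide)]
  rw [List.any_map]
  refine List.any_congr rfl fun f => ?_
  simp [PySem.Str.isIn]
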